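-- pv_equiv track=rewrite | github.com/makumark/BA-Assistant-Tool | react-python-auth/backend/test_server.py | parse_epics_from_brd
-- ===== SOURCE A (Python) =====
-- def parse_epics_from_brd(brd_content):
--     """Parse actual EPICs from BRD content"""
--     epics = []
--     lines = brd_content.split('\n')
--
--     for line in lines:
--         line = line.strip()
--         if 'EPIC-' in line or 'Epic' in line:
--             # Extract EPIC details
--             if 'Course management' in line or 'course management' in line:
--                 epics.append({
--                     "name": "Course Management",
--                     "description": "Create/publish courses, modules, prerequisites, and schedules"
--                 })
--             elif 'Learning delivery' in line or 'learning delivery' in line: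
--                 epics.append({
--                     "name": "Learning Delivery",
--                     "description": "Videos, SCORM/HTML content, quizzes/assignments with grading and feedback"
--                 })
--             elif 'Classroom' in line or 'classroom' in line:
--                 epics.append({
--                     "name": "Virtual Classroom",
--                     "description": "Live sessions, recordings, attendance, Q&A/polls, breakout groups"
--                 })
--             elif 'Learner experience' in line or 'learner experience' in line:
--                 epics.append({
--                     "name": "Learner Experience",
--                     "description": "Onboarding, progress tracking, recommendations, certificates"
--                 })
--             elif 'Collaboration' in line or 'collaboration' in line:
--                 epics.append({
--                     "name": "Collaboration",
--                     "description": "Forums, messaging, announcements, notifications"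
--                 })
--             elif 'Administration' in line or 'administration' in line:
--                 epics.append({
--                     "name": "Administration",
--                     "description": "Roles/permissions, content library, versioning, audit, analytics"
--                 })
--
--     # If no EPICs found, provide default LMS EPICs
--     if not epics:
--         epics = [
--             {"name": "Course Management", "description": "Course creation and management"},
--             {"name": "Learning Delivery", "description": "Content delivery and assessment"},
--             {"name": "User Management", "description": "User registration and profile management"}
--         ]
--
--     return epics
-- ===== SOURCE B (Python) =====
-- _RULES = [
--     (("Course management", "course management"),
--      {"name": "Course Management",
--       "description": "Create/publish courses, modules, prerequisites, and schedules"}),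
--     (("Learning delivery", "learning delivery"),
--      {"name": "Learning Delivery",
--       "description": "Videos, SCORM/HTML content, quizzes/assignments with grading and feedback"}),
--     (("Classroom", "classroom"),
--      {"name": "Virtual Classroom",
--       "description": "Live sessions, recordings, attendance, Q&A/polls, breakout groups"}),
--     (("Learner experience", "learner experience"),
--      {"name": "Learner Experience",
--       "description": "Onboarding, progress tracking, recommendations, certificates"}),
--     (("Collaboration", "collaboration"),
--      {"name": "Collaboration",
--       "description": "Forums, messaging, announcements, notifications"}),
--     (("Administration", "administration"),
--      {"name": "Administration",
--       "description": "Roles/permissions, content library, versioning, audit, analytics"}),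
-- ]
--
-- _DEFAULT = [
--     {"name": "Course Management", "description": "Course creation and management"},
--     {"name": "Learning Delivery", "description": "Content delivery and assessment"},
--     {"name": "User Management", "description": "User registration and profile management"},
-- ]
--
--
-- def parse_epics_from_brd(brd_content):
--     """Parse EPICs from BRD content.
--
--     Rule-major strategy: scan the candidate EPIC lines once per rule (in
--     priority order), record the first rule that claims each line in a dict
--     keyed by line position, then emit the claimed lines back in text order.
--     """
--     lines = [l.strip() for l in brd_content.split('\n')]
--     cand = [(i, l) for i, l in enumerate(lines) if 'EPIC-' in l or 'Epic' in l]
--     best = {}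
--     for (ka, kb), body in _RULES:
--         for i, line in cand:
--             if i not in best and (ka in line or kb in line):
--                 best[i] = dict(body)
--     if not best:
--         return [dict(d) for d in _DEFAULT]
--     return [best[i] for i in sorted(best)]
-- ===== Notes on version B (the rewrite author's own statement) =====
-- stated objective: alternative
-- what changed: Transposed the loop nesting: instead of A's per-line elif cascade, B scans the candidate lines once per rule in priority order, records the first claiming rule per line position in a dict, and reassembles the result by sorting the claimed positions back into text order.
import Mathlib
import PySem

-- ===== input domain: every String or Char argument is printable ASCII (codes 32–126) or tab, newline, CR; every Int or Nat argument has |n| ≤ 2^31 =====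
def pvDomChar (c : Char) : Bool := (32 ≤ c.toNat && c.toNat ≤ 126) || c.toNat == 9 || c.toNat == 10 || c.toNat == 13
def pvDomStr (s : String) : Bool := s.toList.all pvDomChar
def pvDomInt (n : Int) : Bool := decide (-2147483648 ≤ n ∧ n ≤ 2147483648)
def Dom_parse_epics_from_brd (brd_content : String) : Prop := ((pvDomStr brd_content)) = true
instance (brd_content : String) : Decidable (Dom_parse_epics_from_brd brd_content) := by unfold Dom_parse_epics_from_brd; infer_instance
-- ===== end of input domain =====

-- B transposes A's per-line elif cascade into a rule-major scan merged by sorted line position (alternative algorithm, same values).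

-- ===== PORT A =====
-- literal transliteration of A: fold over split lines, strip, trigger test, then the elif cascade appending dicts
def pvStepA (epics : List (List (String × String))) (rawLine : List Char) : List (List (String × String)) :=
  let line := PySem.Chars.strip rawLine
  if PySem.Chars.isIn "EPIC-".toList line || PySem.Chars.isIn "Epic".toList line then
    if PySem.Chars.isIn "Course management".toList line || PySem.Chars.isIn "course management".toList line then
      epics ++ [[("name", "Course Management"), ("description", "Create/publish courses, modules, prerequisites, and schedules")]]
    else if PySem.Chars.isIn "Learning delivery".toList line || PySem.Chars.isIn "learning delivery".toList line then
      epics ++ [[("name", "Learning Delivery"), ("description", "Videos, SCORM/HTML content, quizzes/assignments with grading and feedback")]]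
    else if PySem.Chars.isIn "Classroom".toList line || PySem.Chars.isIn "classroom".toList line then
      epics ++ [[("name", "Virtual Classroom"), ("description", "Live sessions, recordings, attendance, Q&A/polls, breakout groups")]]
    else if PySem.Chars.isIn "Learner experience".toList line || PySem.Chars.isIn "learner experience".toList line then
      epics ++ [[("name", "Learner Experience"), ("description", "Onboarding, progress tracking, recommendations, certificates")]]
    else if PySem.Chars.isIn "Collaboration".toList line || PySem.Chars.isIn "collaboration".toList line then
      epics ++ [[("name", "Collaboration"), ("description", "Forums, messaging, announcements, notifications")]]
    else if PySem.Chars.isIn "Administration".toList line || PySem.Chars.isIn "administration".toList line then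
      epics ++ [[("name", "Administration"), ("description", "Roles/permissions, content library, versioning, audit, analytics")]]
    else epics
  else epics

def parse_epics_from_brd (brd_content : String) : List (List (String × String)) :=
  let epics := (PySem.Chars.splitOn brd_content.toList "\n".toList).foldl pvStepA []
  if epics = [] then
    [[("name", "Course Management"), ("description", "Course creation and management")],
     [("name", "Learning Delivery"), ("description", "Content delivery and assessment")],
     [("name", "User Management"), ("description", "User registration and profile management")]]
  else epics

-- ===== PORT B =====
-- _RULES in Source B: priority-ordered (keyword pair, epic body)
def pvRules : List ((String × String) × List (String × String)) :=
  [(("Course management", "course management"),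
    [("name", "Course Management"), ("description", "Create/publish courses, modules, prerequisites, and schedules")]),
   (("Learning delivery", "learning delivery"),
    [("name", "Learning Delivery"), ("description", "Videos, SCORM/HTML content, quizzes/assignments with grading and feedback")]),
   (("Classroom", "classroom"),
    [("name", "Virtual Classroom"), ("description", "Live sessions, recordings, attendance, Q&A/polls, breakout groups")]),
   (("Learner experience", "learner experience"),
    [("name", "Learner Experience"), ("description", "Onboarding, progress tracking, recommendations, certificates")]),
   (("Collaboration", "collaboration"),
    [("name", "Collaboration"), ("description", "Forums, messaging, announcements, notifications")]),
   (("Administration", "administration"),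
    [("name", "Administration"), ("description", "Roles/permissions, content library, versioning, audit, analytics")])]

def pvDefault : List (List (String × String)) :=
  [[("name", "Course Management"), ("description", "Course creation and management")],
   [("name", "Learning Delivery"), ("description", "Content delivery and assessment")],
   [("name", "User Management"), ("description", "User registration and profile management")]]

-- Source B: rule-major double loop into a dict keyed by line position, then sorted positions
def parse_epics_from_brd_alt (brd_content : String) : List (List (String × String)) :=
  let lines := (PySem.Chars.splitOn brd_content.toList "\n".toList).map PySem.Chars.strip
  let cand := (PySem.List.enumerate lines 0).filter
    (fun p => PySem.Chars.isIn "EPIC-".toList p.2 || PySem.Chars.isIn "Epic".toList p.2)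
  let best : PySem.Dict Int (List (String × String)) :=
    pvRules.foldl (fun d r =>
      cand.foldl (fun d p =>
        if !(PySem.Dict.contains d p.1) &&
           (PySem.Chars.isIn r.1.1.toList p.2 || PySem.Chars.isIn r.1.2.toList p.2) then
          PySem.Dict.insert d p.1 r.2
        else d) d) PySem.Dict.empty
  if PySem.Dict.size best = 0 then pvDefault
  else (PySem.List.sorted (PySem.Dict.keys best) (fun x => x) false).map
    (fun i => PySem.Dict.getD best i [])

-- ===== PRECONDITION & SPEC =====
def Spec_parse_epics_from_brd (brd_content : String) (out : List (List (String × String))) : Prop := out = parse_epics_from_brd_alt brd_content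
instance (brd_content : String) (out : List (List (String × String))) : Decidable (Spec_parse_epics_from_brd brd_content out) := by unfold Spec_parse_epics_from_brd; infer_instance

-- ===== CLAIM (what is proved, stated in full; the proofs are below) =====
def Claim_equal_parse_epics_from_brd : Prop := ∀ (brd_content : String), Dom_parse_epics_from_brd brd_content → Spec_parse_epics_from_brd brd_content (parse_epics_from_brd brd_content)

-- ===== LEMMAS AND PROOFS =====

-- proof-side vocabulary
def pvTrig (l : List Char) : Bool :=
  PySem.Chars.isIn "EPIC-".toList l || PySem.Chars.isIn "Epic".toList l

def pvMatch (kw : String × String) (l : List Char) : Bool :=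
  PySem.Chars.isIn kw.1.toList l || PySem.Chars.isIn kw.2.toList l

def pvClassify (l : List Char) : Option (List (String × String)) :=
  if pvTrig l then (pvRules.find? (fun r => pvMatch r.1 l)).map (·.2) else none

-- one step of A's cascade appends exactly the classification of the stripped line
theorem pvStepA_eq (epics : List (List (String × String))) (l : List Char) :
    pvStepA epics l = epics ++ (pvClassify (PySem.Chars.strip l)).toList := by
  cases ha : PySem.Chars.isIn "EPIC-".toList (PySem.Chars.strip l) <;>
  cases hb : PySem.Chars.isIn "Epic".toList (PySem.Chars.strip l) <;>
  cases h1 : (PySem.Chars.isIn "Course management".toList (PySem.Chars.strip l) || PySem.Chars.isIn "course management".toList (PySem.Chars.strip l)) <;>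
  cases h2 : (PySem.Chars.isIn "Learning delivery".toList (PySem.Chars.strip l) || PySem.Chars.isIn "learning delivery".toList (PySem.Chars.strip l)) <;>
  cases h3 : (PySem.Chars.isIn "Classroom".toList (PySem.Chars.strip l) || PySem.Chars.isIn "classroom".toList (PySem.Chars.strip l)) <;>
  cases h4 : (PySem.Chars.isIn "Learner experience".toList (PySem.Chars.strip l) || PySem.Chars.isIn "learner experience".toList (PySem.Chars.strip l)) <;>
  cases h5 : (PySem.Chars.isIn "Collaboration".toList (PySem.Chars.strip l) || PySem.Chars.isIn "collaboration".toList (PySem.Chars.strip l)) <;>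
  cases h6 : (PySem.Chars.isIn "Administration".toList (PySem.Chars.strip l) || PySem.Chars.isIn "administration".toList (PySem.Chars.strip l)) <;>
  simp only [pvStepA, pvClassify, pvTrig, pvMatch, pvRules, List.find?, ha, hb, h1, h2, h3, h4, h5, h6,
    Bool.or_true, Bool.or_false,
    if_true, Option.map_some, Option.map_none, Option.toList_none, Option.toList_some,
    List.append_nil] <;> simp

-- A's loop is the classification filterMap over the stripped lines
theorem pvFoldA (raws : List (List Char)) (acc : List (List (String × String))) :
    raws.foldl pvStepA acc = acc ++ (raws.map PySem.Chars.strip).filterMap pvClassify := by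
  induction raws generalizing acc with
  | nil => simp
  | cons l t ih =>
      simp only [List.foldl_cons, List.map_cons, List.filterMap_cons, ih, pvStepA_eq]
      cases pvClassify (PySem.Chars.strip l) <;> simp

-- B's inner fold never touches a key that is not among the pairs' positions
theorem pvInner_untouched (q : Int × List Char → Bool) (v : List (String × String))
    (cs : List (Int × List Char)) (d : PySem.Dict Int (List (String × String))) (i : Int)
    (h : i ∉ cs.map Prod.fst) :
    (cs.foldl (fun d p => if !(PySem.Dict.contains d p.1) && q p then PySem.Dict.insert d p.1 v else d) d).get? i
      = d.get? i := by
  induction cs generalizing d with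
  | nil => rfl
  | cons p t ih =>
      simp only [List.map_cons, List.mem_cons, not_or] at h
      simp only [List.foldl_cons]
      rw [ih _ h.2]
      split
      · exact PySem.Dict.get?_insert_of_ne _ _ h.1
      · rfl

-- value of a key after B's inner fold (distinct positions)
theorem pvInner_get (q : Int × List Char → Bool) (v : List (String × String))
    (cs : List (Int × List Char)) (d : PySem.Dict Int (List (String × String))) (i : Int)
    (hnd : (cs.map Prod.fst).Nodup) :
    (cs.foldl (fun d p => if !(PySem.Dict.contains d p.1) && q p then PySem.Dict.insert d p.1 v else d) d).get? i
      = match cs.find? (fun p => p.1 == i) with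
        | none => d.get? i
        | some p => if !(PySem.Dict.contains d i) && q p then some v else d.get? i := by
  induction cs generalizing d with
  | nil => rfl
  | cons p t ih =>
      simp only [List.map_cons, List.nodup_cons] at hnd
      simp only [List.foldl_cons, List.find?]
      by_cases hpi : p.1 = i
      · subst hpi
        simp only [beq_self_eq_true]
        have hnot : p.1 ∉ t.map Prod.fst := hnd.1
        by_cases hc : (!(PySem.Dict.contains d p.1) && q p) = true
        · simp only [hc, if_true]
          rw [pvInner_untouched q v t _ p.1 hnot]
          simp [PySem.Dict.get?_insert_self]
        · have hcf : (!(PySem.Dict.contains d p.1) && q p) = false := by simpa using hc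
          simp only [hcf, Bool.false_eq_true, if_false]
          exact pvInner_untouched q v t _ p.1 hnot
      · have hne : (p.1 == i) = false := by simpa using hpi
        simp only [hne]
        have hd' : ∀ d' : PySem.Dict Int (List (String × String)),
            (if !(PySem.Dict.contains d p.1) && q p then PySem.Dict.insert d p.1 v else d) = d' →
            d'.get? i = d.get? i ∧ d'.contains i = d.contains i := by
          intro d' hd'
          subst hd'
          split
          · constructor
            · exact PySem.Dict.get?_insert_of_ne _ _ (fun h => hpi h.symm)
            · rw [PySem.Dict.contains_insert]
              have : (i == p.1) = false := by simpa using fun h => hpi h.symm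
              simp [this]
          · exact ⟨rfl, rfl⟩
        obtain ⟨h1, h2⟩ := hd' _ rfl
        rw [ih _ hnd.2]
        cases hf : t.find? (fun p => p.1 == i) with
        | none => simp only [h1]
        | some r => simp only [h1, h2]

-- value of a key after B's double fold: the first rule claiming that position
theorem pvOuter_get (rs : List ((String × String) × List (String × String)))
    (cs : List (Int × List Char)) (d : PySem.Dict Int (List (String × String))) (i : Int)
    (hnd : (cs.map Prod.fst).Nodup) :
    (rs.foldl (fun d r =>
        cs.foldl (fun d p =>
          if !(PySem.Dict.contains d p.1) &&
             (PySem.Chars.isIn r.1.1.toList p.2 || PySem.Chars.isIn r.1.2.toList p.2) then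
            PySem.Dict.insert d p.1 r.2
          else d) d) d).get? i
      = match cs.find? (fun p => p.1 == i) with
        | none => d.get? i
        | some p =>
          if PySem.Dict.contains d i then d.get? i
          else match rs.find? (fun r => pvMatch r.1 p.2) with
               | some r => some r.2
               | none => d.get? i := by
  induction rs generalizing d with
  | nil => cases hf : cs.find? (fun p => p.1 == i) <;> simp
  | cons r rs ih =>
      simp only [List.foldl_cons]
      set d₁ := cs.foldl (fun d p =>
          if !(PySem.Dict.contains d p.1) &&
             (PySem.Chars.isIn r.1.1.toList p.2 || PySem.Chars.isIn r.1.2.toList p.2) then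
            PySem.Dict.insert d p.1 r.2
          else d) d with hd₁
      have hget : d₁.get? i
          = match cs.find? (fun p => p.1 == i) with
            | none => d.get? i
            | some p => if !(PySem.Dict.contains d i) && pvMatch r.1 p.2 then some r.2 else d.get? i := by
        rw [hd₁]
        exact pvInner_get (fun p => pvMatch r.1 p.2) r.2 cs d i hnd
      rw [ih d₁]
      cases hf : cs.find? (fun p => p.1 == i) with
      | none => simp only [hf] at hget ⊢; exact hget
      | some p =>
          simp only [hf] at hget ⊢
          have hc₁ : d₁.contains i = (d₁.get? i).isSome := PySem.Dict.contains_eq_isSome_get? _ _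
          by_cases hcd : PySem.Dict.contains d i = true
          · have : d₁.get? i = d.get? i := by simp [hget, hcd]
            simp only [List.find?]
            rw [hc₁, this, ← PySem.Dict.contains_eq_isSome_get?, hcd]
            simp
          · have hcdf : PySem.Dict.contains d i = false := by simpa using hcd
            by_cases hm : pvMatch r.1 p.2 = true
            · have hv : d₁.get? i = some r.2 := by simp [hget, hcdf, hm]
              simp only [List.find?, hm]
              rw [hc₁, hv]
              simp [hcdf]
            · have hmf : pvMatch r.1 p.2 = false := by simpa using hm
              have hv : d₁.get? i = d.get? i := by simp [hget, hcdf, hmf]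
              have hgn : d.get? i = none := by
                have := PySem.Dict.contains_eq_isSome_get? d i
                rw [hcdf] at this
                cases h : d.get? i with
                | none => rfl
                | some w => rw [h] at this; simp at this
              simp only [List.find?, hmf]
              rw [hc₁, hv, hgn]
              simp [hcdf]

-- B's inner fold keeps the dict keys distinct
theorem pvInner_nodup (q : Int × List Char → Bool) (v : List (String × String))
    (cs : List (Int × List Char)) (d : PySem.Dict Int (List (String × String)))
    (h : d.keys.Nodup) :
    (cs.foldl (fun d p => if !(PySem.Dict.contains d p.1) && q p then PySem.Dict.insert d p.1 v else d) d).keys.Nodup := by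
  induction cs generalizing d with
  | nil => exact h
  | cons p t ih =>
      simp only [List.foldl_cons]
      apply ih
      split
      · exact PySem.Dict.nodup_keys_insert _ _ _ h
      · exact h

-- B's double fold keeps the dict keys distinct
theorem pvOuter_nodup (rs : List ((String × String) × List (String × String)))
    (cs : List (Int × List Char)) (d : PySem.Dict Int (List (String × String)))
    (h : d.keys.Nodup) :
    (rs.foldl (fun d r =>
        cs.foldl (fun d p =>
          if !(PySem.Dict.contains d p.1) &&
             (PySem.Chars.isIn r.1.1.toList p.2 || PySem.Chars.isIn r.1.2.toList p.2) then
            PySem.Dict.insert d p.1 r.2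
          else d) d) d).keys.Nodup := by
  induction rs generalizing d with
  | nil => exact h
  | cons r rs ih =>
      simp only [List.foldl_cons]
      exact ih _ (pvInner_nodup _ _ cs d h)

-- on a list with distinct first components, find? by first component returns the member
theorem pvFind_fst_of_mem {β : Type} (cs : List (Int × β)) (hnd : (cs.map Prod.fst).Nodup)
    (i : Int) (l : β) (h : (i, l) ∈ cs) :
    cs.find? (fun p => p.1 == i) = some (i, l) := by
  induction cs with
  | nil => cases h
  | cons p t ih =>
      simp only [List.map_cons, List.nodup_cons] at hnd
      rcases List.mem_cons.mp h with h | h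
      · subst h
        simp [List.find?]
      · have hpi : p.1 ≠ i := by
          intro he
          exact hnd.1 (he ▸ (List.mem_map.mpr ⟨(i, l), h, rfl⟩))
        simp only [List.find?, beq_eq_false_iff_ne.mpr hpi]
        exact ih hnd.2 h

-- index loop over getD positions is the filterMap
theorem pvRangeFilterMap {α β : Type} (f : α → Option β) (e : β) (dflt : α) (xs : List α) :
    ((List.range xs.length).filter (fun k => (f (xs.getD k dflt)).isSome)).map
        (fun k => (f (xs.getD k dflt)).getD e)
      = xs.filterMap f := by
  induction xs using List.reverseRecOn with
  | nil => simp
  | append_singleton xs x ih =>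
      have hlen : (xs ++ [x]).length = xs.length + 1 := by simp
      have hpref : ∀ k ∈ List.range xs.length, (xs ++ [x]).getD k dflt = xs.getD k dflt := by
        intro k hk
        have hk' : k < xs.length := List.mem_range.mp hk
        simp [List.getD_eq_getElem?_getD, List.getElem?_append_left hk']
      have hlast : (xs ++ [x]).getD xs.length dflt = x := by
        simp [List.getD_eq_getElem?_getD]
      rw [hlen, List.range_succ, List.filter_append, List.map_append]
      rw [List.filter_congr (fun k hk => by rw [hpref k hk]),
          List.map_congr_left (fun k hk => by
            rw [hpref k (List.mem_filter.mp hk).1])]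
      rw [ih, List.filterMap_append]
      simp only [List.filter_cons, List.filter_nil, hlast, List.filterMap_cons, List.filterMap_nil]
      cases hfx : f x <;> simp [hfx]

-- ===== VERDICT (by name: the statement is the Claim_ definition above) =====
theorem parse_epics_from_brd_spec : Claim_equal_parse_epics_from_brd := by
  intro brd _
  show parse_epics_from_brd brd = parse_epics_from_brd_alt brd
  rw [parse_epics_from_brd, parse_epics_from_brd_alt]
  set raws := PySem.Chars.splitOn brd.toList "\n".toList with hraws
  set lines := raws.map PySem.Chars.strip with hlines
  set cand := (PySem.List.enumerate lines 0).filter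
    (fun p => PySem.Chars.isIn "EPIC-".toList p.2 || PySem.Chars.isIn "Epic".toList p.2) with hcand
  set best : PySem.Dict Int (List (String × String)) :=
    pvRules.foldl (fun d r =>
      cand.foldl (fun d p =>
        if !(PySem.Dict.contains d p.1) &&
           (PySem.Chars.isIn r.1.1.toList p.2 || PySem.Chars.isIn r.1.2.toList p.2) then
          PySem.Dict.insert d p.1 r.2
        else d) d) PySem.Dict.empty with hbestdef
  -- distinct first components of cand
  have hnd : (cand.map Prod.fst).Nodup := by
    have h1 : cand.Pairwise (fun p q => p.1 < q.1) :=
      List.Pairwise.filter _ (PySem.List.pairwise_lt_enumerate lines 0)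
    have h2 : (cand.map Prod.fst).Pairwise (· < ·) := List.pairwise_map.mpr h1
    exact h2.imp ne_of_lt
  -- membership in cand
  have hmemc : ∀ p : Int × List Char, p ∈ cand ↔
      (∃ k : Nat, ∃ _ : k < lines.length, p = ((k : Int), lines[k])) ∧ pvTrig p.2 = true := by
    intro p
    rw [hcand, List.mem_filter, PySem.List.mem_enumerate_iff]
    simp [pvTrig]
  -- find? in cand at a valid index
  have hfind : ∀ (k : Nat), (hk : k < lines.length) →
      cand.find? (fun p => p.1 == (k : Int))
        = if pvTrig lines[k] then some ((k : Int), lines[k]) else none := by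
    intro k hk
    by_cases ht : pvTrig lines[k] = true
    · rw [if_pos ht]
      exact pvFind_fst_of_mem cand hnd _ _ ((hmemc _).mpr ⟨⟨k, hk, rfl⟩, ht⟩)
    · rw [if_neg ht]
      rw [List.find?_eq_none]
      intro p hp
      obtain ⟨⟨k', hk', hpk⟩, htr⟩ := (hmemc p).mp hp
      subst hpk
      intro he
      have hkk : k' = k := by
        have h2 := eq_of_beq he
        simp only at h2
        exact_mod_cast h2
      exact ht (hkk ▸ htr)
  -- find? in cand is none at non-indices
  have hfind' : ∀ i : Int, (∀ (k : Nat), k < lines.length → i ≠ (k : Int)) →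
      cand.find? (fun p => p.1 == i) = none := by
    intro i hi
    rw [List.find?_eq_none]
    intro p hp
    obtain ⟨⟨k', hk', hpk⟩, _⟩ := (hmemc p).mp hp
    subst hpk
    simpa using (hi k' hk').symm
  -- the dict after the double fold
  have hbest : ∀ i : Int, best.get? i
      = match cand.find? (fun p => p.1 == i) with
        | none => none
        | some p => (pvRules.find? (fun r => pvMatch r.1 p.2)).map (·.2) := by
    intro i
    rw [hbestdef, pvOuter_get pvRules cand PySem.Dict.empty i hnd]
    cases hf : cand.find? (fun p => p.1 == i) with
    | none => simp [PySem.Dict.get?_empty]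
    | some p =>
        simp only [PySem.Dict.contains_empty, PySem.Dict.get?_empty, Bool.false_eq_true, if_false]
        cases hr : pvRules.find? (fun r => pvMatch r.1 p.2) <;> simp
  -- value at a valid index is the classification
  have hbest' : ∀ (k : Nat), k < lines.length →
      best.get? (k : Int) = pvClassify (lines.getD k []) := by
    intro k hk
    rw [hbest, hfind k hk]
    have hgd : lines.getD k [] = lines[k] := List.getD_eq_getElem lines [] hk
    rw [pvClassify, hgd]
    by_cases ht : pvTrig lines[k] = true
    · simp [ht]
    · simp [eq_false_of_ne_true ht]
  -- keys of best
  have hkeys : ∀ i : Int, i ∈ best.keys ↔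
      ∃ k : Nat, k < lines.length ∧ i = (k : Int) ∧ (pvClassify (lines.getD k [])).isSome := by
    intro i
    constructor
    · intro hmem
      have hne : best.get? i ≠ none := by
        intro h0
        exact (PySem.Dict.get?_eq_none_iff_not_mem_keys best i).mp h0 hmem
      by_cases hex : ∃ k : Nat, k < lines.length ∧ i = (k : Int)
      · obtain ⟨k, hk, rfl⟩ := hex
        refine ⟨k, hk, rfl, ?_⟩
        rw [hbest' k hk] at hne
        exact Option.isSome_iff_ne_none.mpr hne
      · exfalso
        apply hne
        rw [hbest, hfind' i]
        intro k hk he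
        exact hex ⟨k, hk, he⟩
    · rintro ⟨k, hk, rfl, hs⟩
      by_contra hmem
      have := (PySem.Dict.get?_eq_none_iff_not_mem_keys best (k : Int)).mpr hmem
      rw [hbest' k hk] at this
      rw [this] at hs
      simp at hs
  have hknodup : best.keys.Nodup := hbestdef ▸ pvOuter_nodup pvRules cand PySem.Dict.empty PySem.Dict.nodup_keys_empty
  -- the sorted key list, named
  set T : List Int := ((List.range lines.length).filter
      (fun k => (pvClassify (lines.getD k [])).isSome)).map (fun k : Nat => (k : Int)) with hT
  have hT_pairwise : T.Pairwise (· < ·) := by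
    rw [hT]
    rw [List.pairwise_map]
    exact (List.Pairwise.filter _ List.pairwise_lt_range).imp (fun hab => by exact_mod_cast hab)
  have hT_nodup : T.Nodup := hT_pairwise.imp ne_of_lt
  have hmemT : ∀ i : Int, i ∈ T ↔
      ∃ k : Nat, k < lines.length ∧ i = (k : Int) ∧ (pvClassify (lines.getD k [])).isSome := by
    intro i
    rw [hT]
    constructor
    · intro h
      obtain ⟨k, hkf, hki⟩ := List.mem_map.mp h
      obtain ⟨hkr, hs⟩ := List.mem_filter.mp hkf
      exact ⟨k, List.mem_range.mp hkr, hki.symm, by simpa using hs⟩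
    · rintro ⟨k, hk, rfl, hs⟩
      exact List.mem_map.mpr ⟨k, List.mem_filter.mpr ⟨List.mem_range.mpr hk, by simpa using hs⟩, rfl⟩
  have hperm : T.Perm best.keys :=
    (List.perm_ext_iff_of_nodup hT_nodup hknodup).mpr
      (fun i => (hmemT i).trans (hkeys i).symm)
  have hsorted : PySem.List.sorted best.keys (fun x => x) false = T :=
    PySem.List.sorted_eq_of_perm_of_pairwise_lt _ _ _ hperm hT_pairwise
  -- mapping the sorted keys gives the filterMap
  have hmap : T.map (fun i => PySem.Dict.getD best i []) = lines.filterMap pvClassify := by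
    rw [hT, List.map_map]
    rw [List.map_congr_left (l := (List.range lines.length).filter
        (fun k => (pvClassify (lines.getD k [])).isSome))
      (f := (fun i => PySem.Dict.getD best i []) ∘ (fun k : Nat => (k : Int)))
      (g := fun k => (pvClassify (lines.getD k [])).getD [])
      (fun k hk => by
        obtain ⟨hkr, _⟩ := List.mem_filter.mp hk
        have hk' : k < lines.length := List.mem_range.mp hkr
        simp only [Function.comp_apply]
        rw [PySem.Dict.getD_eq_get?_getD, hbest' k hk'])]
    exact pvRangeFilterMap pvClassify [] [] lines
  -- emptiness of the dict matches emptiness of the filterMap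
  have hempty : (PySem.Dict.size best = 0) ↔ lines.filterMap pvClassify = [] := by
    have hkl : best.keys.length = PySem.Dict.size best := by
      simp [PySem.Dict.keys, PySem.Dict.size]
    have hTl : T.length = best.keys.length := hperm.length_eq
    rw [← hmap]
    constructor
    · intro h0
      have : T.length = 0 := by omega
      simp [List.length_eq_zero_iff.mp this]
    · intro h0
      have : T.length = 0 := by
        have := congrArg List.length h0
        simpa using this
      omega
  -- both programs
  rw [pvFoldA, List.nil_append, hsorted, hmap]
  by_cases h0 : lines.filterMap pvClassify = []
  · rw [if_pos h0, if_pos (hempty.mpr h0)]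
    rfl
  · rw [if_neg h0, if_neg (fun hs => h0 (hempty.mp hs))]
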